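/-
  The codebook family (codebook_decode_scalar_raw, compute_sorted_huffman, codebook_decode_deinterleave_repeat, codebook_decode):
  the frame facts of a segmented function over a segment's stores.

    * `Mid.carry_mid`: `Mid` at a segment's exit from `Mid` at its entry, when the slots of the return address and of the six
      saved registers read the same (ONE `Mem.EqOn`, by `u_memnorm; u_eqon`, instead of seven slot proofs per exit);
    * `BookPre.book_place`: where the struct at `c` is, as one arithmetic fact for `u_omega`;
    * `Codebook.SameFields.of_sameExcept_off`: the fields of the struct at `c` read the same over a `SameExcept` off the struct.
-/
import Asan.CheckWalk
import Vorbis.Spec.Codebook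

open X86 X86.User Asan Vorbis Vorbis.Spec

set_option maxRecDepth 4000
set_option maxHeartbeats 4000000

namespace Vorbis.Spec

/-- **The frame facts (`Mid`) at an exit**, from those at the segment's entry `u`: the slots of the return address and of the six
saved registers (`[e.rsp − 48, e.rsp + 8)`) read the same (`hEq`); the other fields are given: `hrsp` from the walker's `w_rsp`,
`hsame` by `u_same` through `Mid.same`, `hcode` = the walker's `w_eq`, `hinv` by `abiInv_of`, `hun` by `v_untouched`. `hroom`,
`htop` follow from `Mid.atEntry` (`v_entry`). -/
theorem Mid.carry_mid {u₀ : State} {s : Spec} {entry ret : Word} {e u v : State} {sp : Word}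
    (h : Mid u₀ s entry ret e sp u) (hroom : 48 ≤ (e.reg .rsp).toNat) (htop : (e.reg .rsp).toNat + 8 < 2 ^ 64)
    (hEq : Mem.EqOn ((e.reg .rsp).toNat - 48) ((e.reg .rsp).toNat + 8) u.mem v.mem)
    (hrsp : v.reg .rsp = sp) (hsame : Mem.SameExcept (s.footprint e) e.mem v.mem) (hcode : CodeOK u₀ v.mem)
    (hinv : abiInv v) (hun : ShadowUntouched e.mem v.mem) : Mid u₀ s entry ret e sp v := by
  obtain ⟨he, _, hra, h15, h14, h13, h12, hbp, hbx, _, _, _, _⟩ := h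
  refine ⟨he, hrsp, ?_, ?_, ?_, ?_, ?_, ?_, ?_, hsame, hcode, hinv, hun⟩
  · rw [hEq.readLE (e.reg .rsp) 8 (by omega) (by omega) (by omega)]
    exact hra
  · rw [hEq.readLE (e.reg .rsp - 8) 8 (by u_omega) (by u_omega) (by u_omega)]
    exact h15
  · rw [hEq.readLE (e.reg .rsp - 16) 8 (by u_omega) (by u_omega) (by u_omega)]
    exact h14
  · rw [hEq.readLE (e.reg .rsp - 24) 8 (by u_omega) (by u_omega) (by u_omega)]
    exact h13
  · rw [hEq.readLE (e.reg .rsp - 32) 8 (by u_omega) (by u_omega) (by u_omega)]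
    exact h12
  · rw [hEq.readLE (e.reg .rsp - 40) 8 (by u_omega) (by u_omega) (by u_omega)]
    exact hbp
  · rw [hEq.readLE (e.reg .rsp - 48) 8 (by u_omega) (by u_omega) (by u_omega)]
    exact hbx

/-- **Where the struct at `c` is**, as one arithmetic fact for `u_omega`: above the text (`0x119d40 = L.textHi`), inside the data
space, off the stack below `rsp + 8` (above the function's own frame, or off the stack region). `htop` follows from the room
fact of `AtEntry`. -/
theorem BookPre.book_place {others : List Obj} {frames : List (Nat × FrameLayout)} {Blk : Block → Prop} {len : Nat}
    {u : State} (h : BookPre others frames Blk len u) (htop : 0x700000 < (u.reg .rsp).toNat + 8) :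
    0x119d40 ≤ (u.reg .rsi).toNat ∧ (u.reg .rsi).toNat + 2120 ≤ 0xC00000 ∧
      ((u.reg .rsp).toNat + 8 ≤ (u.reg .rsi).toNat ∨ (u.reg .rsi).toNat + 2120 ≤ 0x700000 ∨
        0x800000 ≤ (u.reg .rsi).toNat) := by
  obtain ⟨B, hB, hin⟩ := h.book
  have hsite : Site (Live (stackObjs frames ++ others)) (u.reg .rsi).toNat 2120 :=
    Codebook.site_field h.reader.env.live hB hin 0 2120 (by decide) (by decide) rfl
  have hw := site_where h.reader.shadow.inv h.reader.shadow.offText htop hsite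
  have e : L.textHi = 0x119d40 := rfl
  omega

end Vorbis.Spec

namespace Vorbis.Codebook

/-- **The fields of the struct at `c` read the same in two memories that differ only inside windows off the struct** (the
function's own frame, windows of `*f`): for `DecodeRawResult e.mem …` from facts about a later memory. -/
theorem SameFields.of_sameExcept_off {m0 m : Mem} {c : Nat} {ws : List Span} (hs : Mem.SameExcept ws m0 m)
    (hc : c + 2120 < 2 ^ 64)
    (hoff : ∀ w, w ∈ ws → c + 2120 ≤ w.lo ∨ w.hi ≤ c) : Codebook.SameFields m0 m c := by
  apply Codebook.SameFields.of_same
  · simp only [voff]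
    omega
  · simp only [voff]
    exact hs.eqOn _ _ hoff

end Vorbis.Codebook
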